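-- pv_equiv track=rewrite | github.com/laichunpongben/CodeJam | Moist.py | insertionSortAndCount
-- ===== SOURCE A (Python) =====
-- def insertionSortAndCount(mylist):
--     count = 0
--     for index in range(1, len(mylist)):
--         currentValue = mylist[index]
--         position = index
--
--         if (position > 0 and mylist[position - 1] > currentValue): count += 1
--         while position > 0 and mylist[position - 1] > currentValue:
--             mylist[position] = mylist[position - 1]
--             position = position - 1
--
--         mylist[position] = currentValue
--     return count
-- ===== SOURCE B (Python) =====
-- # Single pass with a running maximum; counts elements strictly below the max so far.
-- # Note: A sorts mylist in place; B does not mutate it (equivalence is about the return value).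
-- def insertionSortAndCount(mylist):
--     count = 0
--     if mylist:
--         m = mylist[0]
--         for x in mylist[1:]:
--             if x < m:
--                 count += 1
--             else:
--                 m = x
--     return count
-- ===== Notes on version B (the rewrite author's own statement) =====
-- stated objective: faster
-- what changed: Replaces the in-place insertion sort (whose shifting loop makes it quadratic) by a single linear pass that tracks the running maximum and counts elements strictly smaller than it; B does not mutate the input list.
import Mathlib
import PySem

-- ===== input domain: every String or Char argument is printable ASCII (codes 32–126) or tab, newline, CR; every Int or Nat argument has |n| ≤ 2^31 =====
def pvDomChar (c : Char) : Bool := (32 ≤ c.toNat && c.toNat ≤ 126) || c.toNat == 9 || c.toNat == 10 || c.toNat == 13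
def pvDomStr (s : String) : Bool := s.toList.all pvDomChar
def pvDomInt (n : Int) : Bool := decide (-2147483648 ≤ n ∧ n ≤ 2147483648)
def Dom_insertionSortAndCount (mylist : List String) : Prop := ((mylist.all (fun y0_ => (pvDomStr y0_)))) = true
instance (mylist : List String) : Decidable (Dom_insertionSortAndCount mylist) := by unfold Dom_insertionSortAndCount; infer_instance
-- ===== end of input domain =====

-- B replaces A's in-place insertion sort by a single linear pass tracking the running maximum;
-- A sorts its argument in place and B does not: the equivalence proved here is about the return value only.

-- ===== PORT A =====
-- the inner 'while position > 0 and mylist[position-1] > currentValue' loop: shifts elements right,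
-- returns the final list state and the final position (indices are always in range, so getD's default is never used)
def aInner (lst : List String) (cur : String) (pos : Nat) : List String × Nat :=
  match pos with
  | 0 => (lst, 0)
  | p + 1 =>
    if lst.getD p "" > cur then
      aInner (lst.set (p + 1) (lst.getD p "")) cur p
    else
      (lst, p + 1)

-- one iteration of the 'for index in range(1, len(mylist))' loop, state = (list, count)
def aStep (st : List String × Int) (index : Nat) : List String × Int :=
  let cur := st.1.getD index ""
  let count := if 0 < index ∧ st.1.getD (index - 1) "" > cur then st.2 + 1 else st.2
  let r := aInner st.1 cur index
  (r.1.set r.2 cur, count)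

def insertionSortAndCount (mylist : List String) : Int :=
  ((List.range' 1 (mylist.length - 1)).foldl aStep (mylist, 0)).2

-- ===== PORT B =====
-- state = (running maximum, count); one step of B's single pass
def bStep (mc : String × Int) (x : String) : String × Int :=
  if x < mc.1 then (mc.1, mc.2 + 1) else (x, mc.2)

def insertionSortAndCount_alt (mylist : List String) : Int :=
  match mylist with
  | [] => 0
  | h :: t => (t.foldl bStep (h, 0)).2

-- ===== PRECONDITION & SPEC =====
def Spec_insertionSortAndCount (mylist : List String) (out : Int) : Prop := out = insertionSortAndCount_alt mylist
instance (mylist : List String) (out : Int) : Decidable (Spec_insertionSortAndCount mylist out) := by unfold Spec_insertionSortAndCount; infer_instance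

-- ===== CLAIM (what is proved, stated in full; the proofs are below) =====
def Claim_equal_insertionSortAndCount : Prop := ∀ (mylist : List String), Dom_insertionSortAndCount mylist → Spec_insertionSortAndCount mylist (insertionSortAndCount mylist)

-- ===== LEMMAS AND PROOFS =====

theorem pv_set_append {α : Type} (l1 l2 : List α) (x : α) :
    (l1 ++ l2).set (l1.length) x = l1 ++ l2.set 0 x := by
  induction l1 with
  | nil => simp
  | cons a t ih => simp [ih]

theorem pv_getD_append_len {α : Type} [Inhabited α] (l1 l2 : List α) (d : α) :
    (l1 ++ l2).getD l1.length d = l2.getD 0 d := by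
  simp [List.getD, List.getElem?_append_right]

theorem pv_getD_append_lt {α : Type} [Inhabited α] (l1 l2 : List α) (i : Nat)
    (h : i < l1.length) (d : α) : (l1 ++ l2).getD i d = l1.getD i d := by
  simp [List.getD, List.getElem?_append_left h]

-- characterisation of the inner shifting loop followed by the final write 'mylist[position] = currentValue':
-- on a sorted prefix it produces some sorted permutation of cur :: prefix, and leaves the suffix alone
theorem aInner_spec (pre : List String) (cur : String) (hs : pre.Pairwise (· ≤ ·)) :
    ∀ (j : String) (suf : List String) (n : Nat), n = pre.length →
    ∃ q, ((aInner (pre ++ j :: suf) cur n).1.set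
            (aInner (pre ++ j :: suf) cur n).2 cur) = q ++ suf ∧
         q.Pairwise (· ≤ ·) ∧ q.Perm (cur :: pre) := by
  induction pre using List.reverseRecOn with
  | nil =>
    intro j suf n hn; subst hn
    exact ⟨[cur], by simp [aInner], by simp, by simp⟩
  | append_singleton pre' a ih =>
    intro j suf n hn
    have hsp : pre'.Pairwise (· ≤ ·) := (List.pairwise_append.mp hs).1
    have hle : ∀ x ∈ pre', x ≤ a := by
      intro x hx
      exact (List.pairwise_append.mp hs).2.2 x hx a (by simp)
    have hshape : (pre' ++ [a]) ++ j :: suf = pre' ++ a :: j :: suf := by simp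
    have hn' : n = pre'.length + 1 := by simp [hn]
    rw [hshape, hn']
    by_cases hc : a > cur
    · -- shift a one slot to the right and continue at position - 1
      have hset : (pre' ++ a :: j :: suf).set (pre'.length + 1) a = pre' ++ a :: a :: suf := by
        have := pv_set_append (pre' ++ [a]) (j :: suf) a
        simpa using this
      have hstep : aInner (pre' ++ a :: j :: suf) cur (pre'.length + 1)
          = aInner (pre' ++ a :: a :: suf) cur pre'.length := by
        simp [aInner, hc, hset]
      rw [hstep]
      obtain ⟨q', hq'eq, hq's, hq'p⟩ := ih hsp a (a :: suf) pre'.length rfl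
      refine ⟨q' ++ [a], ?_, ?_, ?_⟩
      · rw [hq'eq]; simp
      · refine List.pairwise_append.mpr ⟨hq's, by simp, ?_⟩
        intro x hx b hb
        rw [List.mem_singleton] at hb
        rw [hb]
        have hx' : x ∈ cur :: pre' := hq'p.mem_iff.mp hx
        rcases List.mem_cons.mp hx' with h1 | h2
        · rw [h1]; exact le_of_lt hc
        · exact hle x h2
      · have hperm := hq'p.append_right [a]
        simpa using hperm
    · -- loop stops; write cur at the current position
      have hstop : aInner (pre' ++ a :: j :: suf) cur (pre'.length + 1)
          = (pre' ++ a :: j :: suf, pre'.length + 1) := by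
        simp [aInner, hc]
      rw [hstop]
      have hset : (pre' ++ a :: j :: suf).set (pre'.length + 1) cur = pre' ++ a :: cur :: suf := by
        have := pv_set_append (pre' ++ [a]) (j :: suf) cur
        simpa using this
      refine ⟨(pre' ++ [a]) ++ [cur], by simp [hset], ?_, ?_⟩
      · refine List.pairwise_append.mpr ⟨hs, by simp, ?_⟩
        intro x hx b hb
        rw [List.mem_singleton] at hb
        rw [hb]
        have hac : a ≤ cur := le_of_not_gt hc
        rcases List.mem_append.mp hx with h1 | h2
        · exact le_trans (hle x h1) hac
        · rw [List.mem_singleton] at h2; rw [h2]; exact hac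
      · simpa using (List.perm_append_singleton cur (pre' ++ [a]))

-- in a sorted snoc list every element is ≤ the last one
theorem pv_sorted_snoc_le (l : List String) (m x : String)
    (hs : (l ++ [m]).Pairwise (· ≤ ·)) (hx : x ∈ l ++ [m]) : x ≤ m := by
  rcases List.mem_append.mp hx with h1 | h2
  · exact (List.pairwise_append.mp hs).2.2 x h1 m (by simp)
  · rw [List.mem_singleton] at h2; subst h2; exact le_rfl

-- the last element of a sorted permutation of cur :: (q0 ++ [m]) is max m cur, i.e. B's updated running maximum
theorem pv_new_last (q0 q0' : List String) (m m' cur : String)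
    (hs : (q0 ++ [m]).Pairwise (· ≤ ·))
    (hs' : (q0' ++ [m']).Pairwise (· ≤ ·))
    (hp : (q0' ++ [m']).Perm (cur :: (q0 ++ [m]))) :
    m' = if cur < m then m else cur := by
  have hm'mem : m' ∈ cur :: (q0 ++ [m]) := hp.mem_iff.mp (by simp)
  have hcurle : cur ≤ m' := pv_sorted_snoc_le q0' m' cur hs' (hp.mem_iff.mpr (by simp))
  have hmle : m ≤ m' := pv_sorted_snoc_le q0' m' m hs' (hp.mem_iff.mpr (by simp))
  have hub : m' = cur ∨ m' ≤ m := by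
    rcases List.mem_cons.mp hm'mem with h1 | h2
    · exact Or.inl h1
    · exact Or.inr (pv_sorted_snoc_le q0 m m' hs h2)
  split_ifs with hc
  · rcases hub with h1 | h2
    · subst h1; exact absurd hc (not_lt.mpr hmle)
    · exact le_antisymm h2 hmle
  · rcases hub with h1 | h2
    · exact h1
    · exact le_antisymm (le_trans h2 (le_of_not_gt hc)) hcurle

-- the loop invariant tying A's fold state to B's: after the steps for indices 1..k the list is a
-- sorted prefix (ending in B's running maximum) followed by the untouched tail, and the counts agree
theorem outer_inv (h : String) (t : List String) (k : Nat) (hk : k ≤ t.length) :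
    ∃ q0 m,
      ((List.range' 1 k).foldl aStep (h :: t, 0)).1 = (q0 ++ [m]) ++ t.drop k ∧
      (q0 ++ [m]).Pairwise (· ≤ ·) ∧
      q0.length = k ∧
      m = ((t.take k).foldl bStep (h, 0)).1 ∧
      ((List.range' 1 k).foldl aStep (h :: t, 0)).2 = ((t.take k).foldl bStep (h, 0)).2 := by
  induction k with
  | zero => exact ⟨[], h, by simp, by simp, rfl, by simp, by simp⟩
  | succ k ih =>
    have hk' : k < t.length := hk
    obtain ⟨q0, m, heq, hsort, hlen, hm, hcnt⟩ := ih (le_of_lt hk')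
    have hrange : List.range' 1 (k + 1) = List.range' 1 k ++ [1 + k] := by
      simpa using (List.range'_concat (s := 1) (n := k) (step := 1))
    have hfold : (List.range' 1 (k + 1)).foldl aStep (h :: t, 0)
        = aStep ((List.range' 1 k).foldl aStep (h :: t, 0)) (k + 1) := by
      rw [hrange, List.foldl_append, Nat.add_comm 1 k]; rfl
    have hdrop : t.drop k = t[k] :: t.drop (k + 1) := List.drop_eq_getElem_cons hk'
    have hlen' : (q0 ++ [m]).length = k + 1 := by simp [hlen]
    have heq' : ((List.range' 1 k).foldl aStep (h :: t, 0)).1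
        = (q0 ++ [m]) ++ t[k] :: t.drop (k + 1) := by rw [heq, hdrop]
    have hcur : ((q0 ++ [m]) ++ t[k] :: t.drop (k + 1)).getD (k + 1) "" = t[k] := by
      rw [← hlen', pv_getD_append_len]; simp
    have hgetk : ((q0 ++ [m]) ++ t[k] :: t.drop (k + 1)).getD k "" = m := by
      rw [pv_getD_append_lt _ _ k (by simp [hlen]) "", ← hlen, pv_getD_append_len]; simp
    obtain ⟨q, hqeq, hqs, hqp⟩ :=
      aInner_spec (q0 ++ [m]) (t[k]) hsort (t[k]) (t.drop (k + 1)) (k + 1) hlen'.symm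
    have hq_ne : q ≠ [] := by
      intro hnil
      have := hqp.length_eq
      simp [hnil] at this
    obtain ⟨q0', m', rfl⟩ : ∃ q0' m', q = q0' ++ [m'] := by
      rcases q.eq_nil_or_concat with h1 | ⟨q0', m', h2⟩
      · exact absurd h1 hq_ne
      · exact ⟨q0', m', by rw [h2, List.concat_eq_append]⟩
    have hm' : m' = if t[k] < m then m else t[k] :=
      pv_new_last q0 q0' m m' (t[k]) hsort hqs hqp
    have htake : t.take (k + 1) = t.take k ++ [t[k]] := by
      simpa using (List.take_concat_get (l := t) (i := k) hk').symm
    have hbfold : (t.take (k + 1)).foldl bStep (h, 0)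
        = bStep ((t.take k).foldl bStep (h, 0)) (t[k]) := by
      rw [htake, List.foldl_append]; rfl
    refine ⟨q0', m', ?_, hqs, ?_, ?_, ?_⟩
    · rw [hfold]
      show (aStep ((List.range' 1 k).foldl aStep (h :: t, 0)) (k + 1)).1 = _
      simp only [aStep, heq', hcur]
      rw [hqeq]
    · have := hqp.length_eq
      simp [hlen] at this
      omega
    · rw [hbfold, hm', hm]
      simp only [bStep]
      split_ifs <;> simp
    · rw [hfold, hbfold]
      show (aStep ((List.range' 1 k).foldl aStep (h :: t, 0)) (k + 1)).2 = _
      simp only [aStep, heq', hcur, Nat.add_sub_cancel, hgetk, hcnt, bStep, gt_iff_lt,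
        Nat.succ_pos, true_and, ← hm]
      split_ifs <;> simp

-- ===== VERDICT (by name: the statement is the Claim_ definition above) =====
theorem insertionSortAndCount_spec : Claim_equal_insertionSortAndCount := by
  intro mylist _
  show insertionSortAndCount mylist = insertionSortAndCount_alt mylist
  cases mylist with
  | nil => rfl
  | cons h t =>
    obtain ⟨q0, m, _, _, _, _, hcnt⟩ := outer_inv h t t.length le_rfl
    simp only [insertionSortAndCount, insertionSortAndCount_alt]
    have hlen : (h :: t).length - 1 = t.length := by simp
    rw [hlen, hcnt, List.take_length]
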